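-- pv_equiv track=rewrite | github.com/NLPrinceton/text_embedding | features.py | split_on_punctuation
-- ===== SOURCE A (Python) =====
-- from unicodedata import category
--
-- PUNCTUATION = {'M', 'P', 'S'}
--
-- def split_on_punctuation(document):
--   '''tokenizes string by splitting on spaces and punctuation
--   Args:
--     document: string
--   Returns:
--     str generator
--   '''
--
--   for token in document.split():
--     if len(token) == 1:
--       yield token
--     else:
--       chunk = token[0]
--       for char0, char1 in zip(token[:-1], token[1:]):
--         #if (char0 in PUNCTUATION) == (char1 in PUNCTUATION):
--         if (category(char0)[0] in PUNCTUATION) == (category(char1)[0] in PUNCTUATION):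
--           chunk += char1
--         else:
--           yield chunk
--           chunk = char1
--       if chunk:
--         yield chunk
-- ===== SOURCE B (Python) =====
-- from unicodedata import category
--
-- PUNCTUATION = {'M', 'P', 'S'}
--
-- def split_on_punctuation(document):
--   '''tokenizes string by splitting on spaces and punctuation
--   Args:
--     document: string
--   Returns:
--     str generator
--   '''
--   for token in document.split():
--     keys = [category(c)[0] in PUNCTUATION for c in token]
--     cuts = [0] + [i for i in range(1, len(token)) if keys[i - 1] != keys[i]] + [len(token)]
--     for a, b in zip(cuts, cuts[1:]):
--       yield token[a:b]
-- ===== Notes on version B (the rewrite author's own statement) =====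
-- stated objective: alternative
-- what changed: Instead of A's character-by-character state machine that accumulates a growing chunk string and flushes it at class changes, B first computes the list of cut POSITIONS (indices where the punctuation class changes) and then emits the pieces by index slicing token[a:b] over consecutive cut pairs.
import Mathlib
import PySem

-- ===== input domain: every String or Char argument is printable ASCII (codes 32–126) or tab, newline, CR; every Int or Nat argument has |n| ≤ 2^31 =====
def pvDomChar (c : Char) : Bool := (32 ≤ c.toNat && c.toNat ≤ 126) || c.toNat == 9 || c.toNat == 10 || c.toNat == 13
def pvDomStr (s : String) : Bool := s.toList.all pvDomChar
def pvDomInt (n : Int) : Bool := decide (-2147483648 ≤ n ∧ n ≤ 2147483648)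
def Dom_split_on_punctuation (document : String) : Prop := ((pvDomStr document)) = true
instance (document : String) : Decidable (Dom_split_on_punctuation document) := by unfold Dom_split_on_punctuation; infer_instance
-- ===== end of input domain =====

-- B replaces A's chunk-accumulating state machine by a staged computation: first the
-- list of cut positions (indices where the punctuation class changes), then index
-- slicing token[a:b] over consecutive cut pairs (objective: alternative, not faster).

-- ===== PORT A =====
-- `category(c)[0] in PUNCTUATION` ({'M','P','S'}): exact table on the printable-ASCII
-- domain (the M/P/S-class ASCII characters are exactly the printable non-alphanumeric
-- non-space ones; tab/newline/CR are class Cc and never occur inside split() tokens).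
def pvIsPunct (c : Char) : Bool :=
  (33 ≤ c.toNat && c.toNat ≤ 47) || (58 ≤ c.toNat && c.toNat ≤ 64) ||
  (91 ≤ c.toNat && c.toNat ≤ 96) || (123 ≤ c.toNat && c.toNat ≤ 126)

-- the body of A's inner for-loop (state = (yielded chunks so far, current chunk))
def pvStepA (st : List (List Char) × List Char) (p : Char × Char) :
    List (List Char) × List Char :=
  if pvIsPunct p.1 == pvIsPunct p.2 then (st.1, st.2 ++ [p.2]) else (st.1 ++ [st.2], [p.2])

-- A's per-token work: the len==1 special case, then the zip(token[:-1], token[1:]) loop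
def pvTokenA (token : List Char) : List (List Char) :=
  if token.length = 1 then [token]
  else
    match token with
    | [] => []  -- unreachable: split() yields no empty token (A's token[0] would raise there)
    | c :: _ =>
      let s := (((PySem.List.slice token none (some (-1))).zip
                  (PySem.List.slice token (some 1) none)).foldl pvStepA ([], [c]))
      if s.2 ≠ [] then s.1 ++ [s.2] else s.1

def split_on_punctuation (document : String) : List String :=
  ((PySem.Str.split₀ document).flatMap (fun t => pvTokenA t.toList)).map
    (fun cs => String.ofList cs)

-- ===== PORT B =====
-- B's per-token work: keys = per-char punctuation class, cuts = [0] + the indices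
-- 1 ≤ i < len where keys[i-1] != keys[i] + [len]  (range(1, len) holds nonnegative
-- ints and every index into keys is in range, so Nat range'/getD are exact here),
-- then the slices token[a:b] over consecutive cut pairs
def pvTokenB (token : List Char) : List (List Char) :=
  let keys := token.map (fun c => pvIsPunct c)
  let cuts := (0 :: (List.range' 1 (token.length - 1)).filter
      (fun i => keys.getD (i - 1) false != keys.getD i false)) ++ [token.length]
  (cuts.zip cuts.tail).map (fun p => PySem.List.slice token (some (p.1 : Int)) (some (p.2 : Int)))

def split_on_punctuation_alt (document : String) : List String :=
  ((PySem.Str.split₀ document).flatMap (fun t => pvTokenB t.toList)).map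
    (fun cs => String.ofList cs)

-- ===== PRECONDITION & SPEC =====
def Spec_split_on_punctuation (document : String) (out : List String) : Prop := out = split_on_punctuation_alt document
instance (document : String) (out : List String) : Decidable (Spec_split_on_punctuation document out) := by unfold Spec_split_on_punctuation; infer_instance

-- ===== CLAIM (what is proved, stated in full; the proofs are below) =====
def Claim_equal_split_on_punctuation : Prop := ∀ (document : String), Dom_split_on_punctuation document → Spec_split_on_punctuation document (split_on_punctuation document)

-- ===== LEMMAS AND PROOFS =====

-- proof-side middle ground: the maximal same-class runs of a token
def pvRuns : List Char → List (List Char)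
  | [] => []
  | c :: rest =>
    (c :: rest.takeWhile (fun d => pvIsPunct d == pvIsPunct c)) ::
      pvRuns (rest.dropWhile (fun d => pvIsPunct d == pvIsPunct c))
termination_by cs => cs.length
decreasing_by
  simp only [List.length_cons]
  exact Nat.lt_succ_of_le (List.length_dropWhile_le _ _)

lemma pvRuns_nil : pvRuns [] = [] := by rw [pvRuns.eq_def]
lemma pvRuns_cons (c : Char) (rest : List Char) :
    pvRuns (c :: rest) =
      (c :: rest.takeWhile (fun d => pvIsPunct d == pvIsPunct c)) ::
        pvRuns (rest.dropWhile (fun d => pvIsPunct d == pvIsPunct c)) := by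
  rw [pvRuns.eq_def]

-- ===== A-side: the state machine yields the maximal runs =====

-- zip(token[:-1], token[1:]) walks the same adjacent pairs as zip(token, token[1:])
lemma pv_zip_dropLast_tail : ∀ (xs : List Char), xs.dropLast.zip xs.tail = xs.zip xs.tail
  | [] => rfl
  | [_] => rfl
  | a :: b :: l => by
    have ih := pv_zip_dropLast_tail (b :: l)
    simp only [List.tail_cons] at ih ⊢
    simp [List.dropLast, ih]

-- invariant of A's fold: with a nonempty current chunk whose class is that of c
-- (the previously seen character), the loop finishes chunk with the maximal run of
-- c's class and then groups the remainder exactly as pvRuns does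
lemma pv_foldA_eq : ∀ (rest : List Char) (c : Char) (acc : List (List Char))
    (chunk : List Char), chunk ≠ [] →
    (let s := ((c :: rest).zip rest).foldl pvStepA (acc, chunk);
     if s.2 ≠ [] then s.1 ++ [s.2] else s.1)
    = acc ++ (chunk ++ rest.takeWhile (fun d => pvIsPunct d == pvIsPunct c)) ::
        pvRuns (rest.dropWhile (fun d => pvIsPunct d == pvIsPunct c))
  | [], c, acc, chunk, h => by simp [h, pvRuns_nil]
  | y :: rs, c, acc, chunk, h => by
    have hz : ((c :: y :: rs).zip (y :: rs)) = (c, y) :: ((y :: rs).zip rs) := rfl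
    by_cases hk : pvIsPunct y = pvIsPunct c
    · have ih := pv_foldA_eq rs y acc (chunk ++ [y]) (by simp)
      simp only [hz, List.foldl_cons, pvStepA, hk, beq_self_eq_true, if_true] at ih ⊢
      rw [ih]
      simp [List.takeWhile, List.dropWhile, hk]
    · have hk' : (pvIsPunct y == pvIsPunct c) = false := by simp [hk]
      have ih := pv_foldA_eq rs y (acc ++ [chunk]) [y] (by simp)
      simp only [hz, List.foldl_cons, pvStepA] at ih ⊢
      have hk'' : (pvIsPunct c == pvIsPunct y) = false := by
        simp; intro he; exact hk he.symm
      rw [hk'']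
      simp only [if_false, Bool.false_eq_true] at ih ⊢
      rw [ih]
      simp only [List.takeWhile_cons, List.dropWhile_cons, hk', Bool.false_eq_true,
        if_false, pvRuns_cons]
      simp

-- per-token agreement on the A side: the state machine = the maximal runs
lemma pv_tokenA_runs (t : List Char) : pvTokenA t = pvRuns t := by
  cases t with
  | nil => simp [pvTokenA, pvRuns_nil]
  | cons c rest =>
    cases rest with
    | nil => simp [pvTokenA, pvRuns_cons, pvRuns_nil]
    | cons y rs =>
      have hlen : (c :: y :: rs).length ≠ 1 := by simp
      unfold pvTokenA
      rw [if_neg hlen]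
      simp only [PySem.List.slice_to_neg_one, PySem.List.slice_from_one, List.tail_cons]
      rw [show (c :: y :: rs).dropLast.zip (y :: rs)
            = ((c :: y :: rs).zip (c :: y :: rs).tail) from pv_zip_dropLast_tail _]
      simp only [List.tail_cons]
      rw [pv_foldA_eq (y :: rs) c [] [c] (by simp)]
      rw [pvRuns_cons]
      simp

-- ===== B-side: cut positions + slicing yield the maximal runs =====

-- the two staged pieces of pvTokenB, named for the proofs
def pvKeys (t : List Char) : List Bool := t.map (fun c => pvIsPunct c)
def pvInner (t : List Char) : List Nat :=
  (List.range' 1 (t.length - 1)).filter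
    (fun i => (pvKeys t).getD (i - 1) false != (pvKeys t).getD i false)
def pvCuts (t : List Char) : List Nat := (0 :: pvInner t) ++ [t.length]

lemma pvTokenB_eq_cuts (t : List Char) :
    pvTokenB t = ((pvCuts t).zip (pvCuts t).tail).map
      (fun p => PySem.List.slice t (some (p.1 : Int)) (some (p.2 : Int))) := rfl

-- keys below the first run's length are the head's class
lemma pv_keys_lt (c : Char) (rest : List Char) (i : Nat)
    (hi : i < (c :: rest.takeWhile (fun d => pvIsPunct d == pvIsPunct c)).length) :
    (pvKeys (c :: rest)).getD i false = pvIsPunct c := by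
  set P := fun d => pvIsPunct d == pvIsPunct c with hP
  set run := c :: rest.takeWhile P with hrun
  have hsplit : c :: rest = run ++ rest.dropWhile P := by
    simp [hrun, List.takeWhile_append_dropWhile]
  have hkeys : pvKeys (c :: rest) = pvKeys run ++ pvKeys (rest.dropWhile P) := by
    rw [pvKeys, hsplit, List.map_append]; rfl
  have hlen : (pvKeys run).length = run.length := by simp [pvKeys]
  rw [hkeys, List.getD_append _ _ _ _ (by omega)]
  have hi' : i < (pvKeys run).length := by omega
  rw [List.getD_eq_getElem _ _ hi']
  simp only [pvKeys] at hi' ⊢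
  rw [List.getElem_map]
  have hx : run[i]'(by simpa using hi') ∈ run := List.getElem_mem (by simpa using hi')
  rcases List.mem_cons.mp hx with he | hx'
  · rw [he]
  · have := List.mem_takeWhile_imp hx'
    simpa [hP] using this

-- keys past the first run are the remainder's keys, shifted
lemma pv_keys_shift (c : Char) (rest : List Char) (i : Nat) :
    (pvKeys (c :: rest)).getD
        ((c :: rest.takeWhile (fun d => pvIsPunct d == pvIsPunct c)).length + i) false
      = (pvKeys (rest.dropWhile (fun d => pvIsPunct d == pvIsPunct c))).getD i false := by
  set P := fun d => pvIsPunct d == pvIsPunct c with hP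
  set run := c :: rest.takeWhile P with hrun
  have hsplit : c :: rest = run ++ rest.dropWhile P := by
    simp [hrun, List.takeWhile_append_dropWhile]
  have hkeys : pvKeys (c :: rest) = pvKeys run ++ pvKeys (rest.dropWhile P) := by
    rw [pvKeys, hsplit, List.map_append]; rfl
  have hlen : (pvKeys run).length = run.length := by simp [pvKeys]
  rw [hkeys, List.getD_append_right _ _ _ _ (by omega)]
  congr 1
  omega

-- the key right after the first run is a different class
lemma pv_keys_at (c : Char) (rest : List Char) (e : Char) (r2 : List Char)
    (he : rest.dropWhile (fun d => pvIsPunct d == pvIsPunct c) = e :: r2) :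
    (pvKeys (c :: rest)).getD
        (c :: rest.takeWhile (fun d => pvIsPunct d == pvIsPunct c)).length false
      = pvIsPunct e ∧ pvIsPunct e ≠ pvIsPunct c := by
  constructor
  · have := pv_keys_shift c rest 0
    rw [Nat.add_zero] at this
    rw [this, he]
    simp [pvKeys]
  · have hne : rest.dropWhile (fun d => pvIsPunct d == pvIsPunct c) ≠ [] := by simp [he]
    have h2 := List.head_dropWhile_not (fun d => pvIsPunct d == pvIsPunct c) hne
    have h3 : (rest.dropWhile (fun d => pvIsPunct d == pvIsPunct c)).head hne = e := by
      simp [he]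
    rw [h3] at h2
    simpa using h2

-- the inner cut list of a token, stated through its first run
lemma pv_inner_eq (c : Char) (rest : List Char) :
    pvInner (c :: rest) =
      (if rest.dropWhile (fun d => pvIsPunct d == pvIsPunct c) = [] then []
       else (c :: rest.takeWhile (fun d => pvIsPunct d == pvIsPunct c)).length ::
         (pvInner (rest.dropWhile (fun d => pvIsPunct d == pvIsPunct c))).map
           ((c :: rest.takeWhile (fun d => pvIsPunct d == pvIsPunct c)).length + ·)) := by
  set P := fun d => pvIsPunct d == pvIsPunct c with hP
  set rest' := rest.dropWhile P with hrest'
  obtain ⟨m, hmrun⟩ : ∃ m, (c :: rest.takeWhile (fun d => pvIsPunct d == pvIsPunct c)).length = m := ⟨_, rfl⟩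
  have hm : 1 ≤ m := by rw [← hmrun]; simp
  rw [hmrun]
  have hsplit : c :: rest = (c :: rest.takeWhile P) ++ rest' := by
    simp [hrest', List.takeWhile_append_dropWhile]
  have hlen : (c :: rest).length = m + rest'.length := by
    conv_lhs => rw [hsplit]
    rw [List.length_append, hmrun]
  have hsmall : ∀ i ∈ List.range' 1 (m - 1),
      ((pvKeys (c :: rest)).getD (i - 1) false != (pvKeys (c :: rest)).getD i false) = false := by
    intro i hi
    rw [List.mem_range'_1] at hi
    rw [pv_keys_lt c rest (i - 1) (by rw [hmrun]; omega),
        pv_keys_lt c rest i (by rw [hmrun]; omega)]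
    simp
  by_cases hd : rest' = []
  · rw [if_pos hd]
    have hn : (c :: rest).length - 1 = m - 1 := by
      rw [hlen, hd]; simp
    rw [pvInner, hn]
    rw [List.filter_eq_nil_iff]
    intro i hi
    show ¬ ((pvKeys (c :: rest)).getD (i - 1) false != (pvKeys (c :: rest)).getD i false) = true
    rw [hsmall i hi]
    simp
  · rw [if_neg hd]
    obtain ⟨e, r2, he⟩ : ∃ e r2, rest' = e :: r2 := by
      cases hx : rest' with
      | nil => exact absurd hx hd
      | cons e r2 => exact ⟨e, r2, rfl⟩
    have hn : (c :: rest).length - 1 = (m - 1) + (r2.length + 1) := by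
      rw [hlen, he]; simp only [List.length_cons]; omega
    rw [pvInner, hn]
    have hsplitrange : List.range' 1 ((m - 1) + (r2.length + 1)) =
        List.range' 1 (m - 1) ++ List.range' m (r2.length + 1) := by
      have h := List.range'_append_1 (s := 1) (m := m - 1) (n := r2.length + 1)
      rw [show 1 + (m - 1) = m from by omega] at h
      exact h.symm
    rw [hsplitrange, List.filter_append]
    have h1 : (List.range' 1 (m - 1)).filter
        (fun i => (pvKeys (c :: rest)).getD (i - 1) false != (pvKeys (c :: rest)).getD i false) = [] := by
      rw [List.filter_eq_nil_iff]
      intro i hi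
      show ¬ ((pvKeys (c :: rest)).getD (i - 1) false != (pvKeys (c :: rest)).getD i false) = true
      rw [hsmall i hi]
      simp
    rw [h1, List.nil_append]
    rw [List.range'_succ]
    have hat := pv_keys_at c rest e r2 (by exact he)
    rw [hmrun] at hat
    have hcondm : ((pvKeys (c :: rest)).getD (m - 1) false != (pvKeys (c :: rest)).getD m false) = true := by
      rw [pv_keys_lt c rest (m - 1) (by rw [hmrun]; omega), hat.1]
      simpa using fun hh => hat.2 hh.symm
    rw [List.filter_cons_of_pos (by simpa using hcondm)]
    congr 1
    have hmap : List.range' (m + 1) r2.length = (List.range' 1 r2.length).map (m + ·) := by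
      rw [List.range'_eq_map_range, List.range'_eq_map_range, List.map_map]
      apply List.map_congr_left
      intro a _
      simp; omega
    rw [hmap, List.filter_map]
    have hre : rest'.length - 1 = r2.length := by rw [he]; simp
    simp only [pvInner, hre]
    congr 1
    apply List.filter_congr
    intro i hi
    rw [List.mem_range'_1] at hi
    have hsh := pv_keys_shift c rest
    rw [hmrun] at hsh
    simp only [Function.comp]
    have h2 : m + i - 1 = m + (i - 1) := by omega
    rw [h2, hsh (i - 1), hsh i]

-- slicing past the first run is slicing the remainder
lemma pv_slice_shift (run rest' : List Char) (a b : Nat) :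
    PySem.List.slice (run ++ rest') (some ((run.length + a : Nat) : Int))
        (some ((run.length + b : Nat) : Int))
      = PySem.List.slice rest' (some (a : Int)) (some (b : Int)) := by
  rw [PySem.List.slice_natCast, PySem.List.slice_natCast]
  rw [show run.length + b - (run.length + a) = b - a from by omega]
  congr 1
  rw [← List.drop_drop, List.drop_left]

-- per-token agreement on the B side, for the nonempty tokens split() produces
lemma pv_tokenB_runs : ∀ (t : List Char), t ≠ [] → pvTokenB t = pvRuns t := by
  suffices H : ∀ (n : Nat) (t : List Char), t.length ≤ n → t ≠ [] → pvTokenB t = pvRuns t by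
    exact fun t ht => H t.length t le_rfl ht
  intro n
  induction n with
  | zero =>
    intro t h1 h2
    cases t with
    | nil => exact absurd rfl h2
    | cons c rest => simp at h1
  | succ n ih =>
    intro t hlen hne
    obtain ⟨c, rest, rfl⟩ : ∃ c rest, t = c :: rest := by
      cases t with
      | nil => exact absurd rfl hne
      | cons c rest => exact ⟨c, rest, rfl⟩
    have hsplit : c :: rest =
        (c :: rest.takeWhile (fun d => pvIsPunct d == pvIsPunct c)) ++
          rest.dropWhile (fun d => pvIsPunct d == pvIsPunct c) := by
      simp [List.takeWhile_append_dropWhile]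
    obtain ⟨m, hmrun⟩ : ∃ m,
        (c :: rest.takeWhile (fun d => pvIsPunct d == pvIsPunct c)).length = m := ⟨_, rfl⟩
    have hm : 1 ≤ m := by rw [← hmrun]; simp
    have hlen2 : (c :: rest).length =
        m + (rest.dropWhile (fun d => pvIsPunct d == pvIsPunct c)).length := by
      conv_lhs => rw [hsplit]
      rw [List.length_append, hmrun]
    by_cases hd : rest.dropWhile (fun d => pvIsPunct d == pvIsPunct c) = []
    · -- single run: cuts = [0, m], one slice = the whole token
      have hcuts : pvCuts (c :: rest) = [0, m] := by
        unfold pvCuts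
        rw [pv_inner_eq, if_pos hd, hlen2, hd]
        simp
      rw [pvTokenB_eq_cuts, hcuts]
      have htm : (c :: rest).length = m := by rw [hlen2, hd]; simp
      show [PySem.List.slice (c :: rest) (some ((0 : Nat) : Int)) (some ((m : Nat) : Int))]
        = pvRuns (c :: rest)
      rw [PySem.List.slice_natCast, pvRuns_cons, hd, pvRuns_nil]
      have : c :: rest = c :: rest.takeWhile (fun d => pvIsPunct d == pvIsPunct c) := by
        conv_lhs => rw [hsplit]
        rw [hd, List.append_nil]
      simp only [List.drop_zero, Nat.sub_zero]
      rw [← htm, List.take_length]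
      rw [← this]
    · -- at least two runs: first slice is the first run, the rest shift down
      have hcuts : pvCuts (c :: rest) =
          0 :: (pvCuts (rest.dropWhile (fun d => pvIsPunct d == pvIsPunct c))).map (m + ·) := by
        unfold pvCuts
        rw [pv_inner_eq, if_neg hd, hmrun, hlen2]
        simp [List.map_append]
      have hCtail : pvCuts (rest.dropWhile (fun d => pvIsPunct d == pvIsPunct c)) =
          0 :: (pvInner (rest.dropWhile (fun d => pvIsPunct d == pvIsPunct c)) ++
            [(rest.dropWhile (fun d => pvIsPunct d == pvIsPunct c)).length]) := by
        unfold pvCuts; simp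
      rw [pvTokenB_eq_cuts, hcuts]
      -- name the remainder's cut list
      obtain ⟨C, hC⟩ : ∃ C,
          pvCuts (rest.dropWhile (fun d => pvIsPunct d == pvIsPunct c)) = C := ⟨_, rfl⟩
      obtain ⟨Ct, hCt⟩ : ∃ Ct, C = 0 :: Ct := ⟨_, (hC ▸ hCtail : C = _)⟩
      rw [hC, hCt]
      simp only [List.map_cons, Nat.add_zero, List.tail_cons]
      -- zip (0 :: m :: M) (m :: M) = (0, m) :: zip (m :: M) M
      rw [List.zip_cons_cons]
      rw [show (m :: Ct.map (m + ·)) = (0 :: Ct).map (m + ·) from by simp]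
      rw [show Ct.map (m + ·) = ((0 :: Ct).map (m + ·)).tail from by simp]
      rw [← List.map_tail, List.zip_map]
      rw [List.map_cons, List.map_map]
      -- first piece
      have hfirst : PySem.List.slice (c :: rest) (some ((0 : Nat) : Int)) (some ((m : Nat) : Int))
          = c :: rest.takeWhile (fun d => pvIsPunct d == pvIsPunct c) := by
        rw [PySem.List.slice_natCast]
        simp only [List.drop_zero, Nat.sub_zero]
        conv_lhs => rw [hsplit]
        rw [← hmrun, List.take_left]
      rw [hfirst, pvRuns_cons]
      congr 1
      -- remaining pieces = pvTokenB rest', then induction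
      have hrw : ∀ p ∈ (0 :: Ct).zip ((0 :: Ct).tail),
          ((fun p => PySem.List.slice (c :: rest) (some ((p.1 : Nat) : Int)) (some ((p.2 : Nat) : Int))) ∘
            Prod.map (fun x => m + x) (fun x => m + x)) p
          = PySem.List.slice (rest.dropWhile (fun d => pvIsPunct d == pvIsPunct c))
              (some ((p.1 : Nat) : Int)) (some ((p.2 : Nat) : Int)) := by
        intro p _
        simp only [Function.comp, Prod.map]
        conv_lhs => rw [hsplit]
        rw [← hmrun]
        exact pv_slice_shift _ _ p.1 p.2
      rw [List.map_congr_left hrw]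
      rw [← hCt, ← hC, ← pvTokenB_eq_cuts]
      apply ih
      · have h3 := List.length_dropWhile_le (fun d => pvIsPunct d == pvIsPunct c) rest
        simp only [List.length_cons] at hlen
        omega
      · exact hd

-- split() yields no empty token
lemma pv_go_nil (cur : List Char) (acc : List (List Char)) :
    PySem.Chars.split₀.go [] cur acc =
      if cur.isEmpty = true then acc.reverse else (cur.reverse :: acc).reverse := by
  rw [PySem.Chars.split₀.go.eq_def]

lemma pv_go_cons (c : Char) (rest cur : List Char) (acc : List (List Char)) :
    PySem.Chars.split₀.go (c :: rest) cur acc =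
      if PySem.Chars.isspace c = true then
        if cur.isEmpty = true then PySem.Chars.split₀.go rest [] acc
        else PySem.Chars.split₀.go rest [] (cur.reverse :: acc)
      else PySem.Chars.split₀.go rest (c :: cur) acc := by
  rw [PySem.Chars.split₀.go.eq_def]

lemma pv_split₀_go_ne_nil : ∀ (s cur : List Char) (acc : List (List Char)),
    (∀ x ∈ acc, x ≠ []) → ∀ t ∈ PySem.Chars.split₀.go s cur acc, t ≠ [] := by
  intro s
  induction s with
  | nil =>
    intro cur acc hacc t ht
    rw [pv_go_nil] at ht
    split_ifs at ht with h
    · exact hacc t (List.mem_reverse.mp ht)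
    · rcases List.mem_cons.mp (List.mem_reverse.mp ht) with rfl | h2
      · simp only [ne_eq, List.reverse_eq_nil_iff]
        intro hc
        rw [hc] at h
        exact h rfl
      · exact hacc t h2
  | cons c rest ih =>
    intro cur acc hacc t ht
    rw [pv_go_cons] at ht
    split_ifs at ht with h1 h2
    · exact ih [] acc hacc t ht
    · refine ih [] (cur.reverse :: acc) ?_ t ht
      intro x hx
      rcases List.mem_cons.mp hx with rfl | h3
      · simp only [ne_eq, List.reverse_eq_nil_iff]
        intro hc
        rw [hc] at h2
        exact h2 rfl
      · exact hacc x h3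
    · exact ih (c :: cur) acc hacc t ht

lemma pv_split₀_ne_nil (s : List Char) (t : List Char)
    (ht : t ∈ PySem.Chars.split₀ s) : t ≠ [] :=
  pv_split₀_go_ne_nil s [] [] (by simp) t ht

-- ===== VERDICT (by name: the statement is the Claim_ definition above) =====
theorem split_on_punctuation_spec : Claim_equal_split_on_punctuation := by
  intro document _
  unfold Spec_split_on_punctuation split_on_punctuation split_on_punctuation_alt
  congr 1
  apply List.flatMap_congr
  intro t ht
  have hmem : t.toList ∈ PySem.Chars.split₀ document.toList := by
    have h := List.mem_map_of_mem (f := String.toList) ht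
    rwa [PySem.Str.split₀_map_toList] at h
  rw [pv_tokenA_runs, pv_tokenB_runs _ (pv_split₀_ne_nil _ _ hmem)]
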